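-- pv_equiv track=rewrite | github.com/mcytang/rubiks_cube | cube.py | string_to_move_list
-- ===== SOURCE A (Python) =====
-- def string_to_move_list(move_string):
--     """
--     converts move string to list to accommodate primes
--     """
--     move_list = []
--     idx = 0
--     while idx < len(move_string):
--         move = move_string[idx]
--         idx += 1
--         if idx < len(move_string):
--             if move_string[idx] == "'":
--                 move += "'"
--                 idx += 1
--         move_list.append(move)
--     return move_list
-- ===== SOURCE B (Python) =====
-- import re
--
-- def string_to_move_list(move_string):
--     """
--     converts move string to list to accommodate primes
--     """
--     return re.findall(r"[\s\S]'?", move_string)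
-- ===== Notes on version B (the rewrite author's own statement) =====
-- stated objective: idiomatic
-- what changed: Replaced the explicit index-walking while loop with a single regex findall (one char, optional trailing prime); the scan runs in the C regex engine instead of a Python-level loop.
import Mathlib
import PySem

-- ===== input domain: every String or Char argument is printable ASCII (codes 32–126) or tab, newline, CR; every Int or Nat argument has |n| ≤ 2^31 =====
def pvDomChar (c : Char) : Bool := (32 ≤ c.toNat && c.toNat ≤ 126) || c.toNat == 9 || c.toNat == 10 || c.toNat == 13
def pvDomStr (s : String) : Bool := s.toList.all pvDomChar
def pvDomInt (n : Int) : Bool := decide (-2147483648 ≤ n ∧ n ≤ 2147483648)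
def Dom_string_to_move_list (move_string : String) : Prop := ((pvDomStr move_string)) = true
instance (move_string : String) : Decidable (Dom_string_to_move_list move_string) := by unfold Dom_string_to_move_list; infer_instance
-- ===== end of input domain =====

-- B replaces A's index-walking while loop with regex-style grouping: one char, optional trailing prime (idiomatic).

-- ===== PORT A =====
-- transliteration of A's while loop over idx, recursing on the remaining length
def stmlLoopA (cs : List Char) (idx : Nat) : List String :=
  if h : idx < cs.length then
    let move := String.ofList [cs[idx]]
    let idx' := idx + 1
    if h2 : idx' < cs.length then
      if cs[idx'] = '\'' then
        (move ++ "'") :: stmlLoopA cs (idx' + 1)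
      else
        move :: stmlLoopA cs idx'
    else
      move :: stmlLoopA cs idx'
  else []
termination_by cs.length - idx

def string_to_move_list (move_string : String) : List String :=
  stmlLoopA move_string.toList 0

-- ===== PORT B =====
-- hand port of re.findall(r"[\s\S]'?", s): left-to-right, each match is one char
-- plus at most one following apostrophe; exact for this pattern on any string.
def stmlGoB : List Char → List String
  | [] => []
  | c :: '\'' :: rest => String.ofList [c, '\''] :: stmlGoB rest
  | c :: rest => String.ofList [c] :: stmlGoB rest

def string_to_move_list_alt (move_string : String) : List String :=
  stmlGoB move_string.toList

-- ===== PRECONDITION & SPEC =====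
def Spec_string_to_move_list (move_string : String) (out : List String) : Prop := out = string_to_move_list_alt move_string
instance (move_string : String) (out : List String) : Decidable (Spec_string_to_move_list move_string out) := by unfold Spec_string_to_move_list; infer_instance

-- ===== CLAIM (what is proved, stated in full; the proofs are below) =====
def Claim_equal_string_to_move_list : Prop := ∀ (move_string : String), Dom_string_to_move_list move_string → Spec_string_to_move_list move_string (string_to_move_list move_string)

-- ===== LEMMAS AND PROOFS =====

-- ===== VERDICT (by name: the statement is the Claim_ definition above) =====
theorem stmlGoB_cons_ne (c d : Char) (rest : List Char) (hd : d ≠ '\'') :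
    stmlGoB (c :: d :: rest) = String.ofList [c] :: stmlGoB (d :: rest) := by
  rw [stmlGoB.eq_def]
  split
  · rename_i heq; exact absurd heq (by simp)
  · rename_i heq; injection heq with h1 h; injection h with h2 h3; exact absurd h2 hd
  · rename_i heq; injection heq with h1 h; rw [h1, h]

theorem stmlLoopA_eq (cs : List Char) : ∀ idx, stmlLoopA cs idx = stmlGoB (cs.drop idx) := by
  intro idx
  induction hfuel : cs.length - idx using Nat.strong_induction_on generalizing idx with
  | _ fuel ih =>
  subst hfuel
  unfold stmlLoopA
  split
  · rename_i h
    have hdrop : cs.drop idx = cs[idx] :: cs.drop (idx + 1) := List.drop_eq_getElem_cons h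
    by_cases h2 : idx + 1 < cs.length
    · have hdrop2 : cs.drop (idx + 1) = cs[idx + 1] :: cs.drop (idx + 2) :=
        List.drop_eq_getElem_cons h2
      by_cases hq : cs[idx + 1] = '\''
      · simp only [h2, hq, dif_pos, if_pos]
        rw [ih _ (by omega) (idx + 2) rfl, hdrop, hdrop2, hq]
        rw [show stmlGoB (cs[idx] :: '\'' :: cs.drop (idx + 2))
              = String.ofList [cs[idx], '\''] :: stmlGoB (cs.drop (idx + 2)) from rfl]
        congr 1
        apply String.ext; simp
      · simp only [h2, hq, dif_pos, if_neg, not_false_iff]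
        rw [ih _ (by omega) (idx + 1) rfl, hdrop, hdrop2,
            stmlGoB_cons_ne _ _ _ hq, ← hdrop2]
    · have hlen : cs.length = idx + 1 := by omega
      simp only [h2, dif_neg, not_false_iff]
      rw [ih _ (by omega) (idx + 1) rfl, hdrop]
      have hnil : cs.drop (idx + 1) = [] := List.drop_eq_nil_of_le (by omega)
      rw [hnil]
      rfl
  · rename_i h
    rw [List.drop_eq_nil_of_le (by omega)]
    rfl

theorem string_to_move_list_spec : Claim_equal_string_to_move_list := by
  intro s _
  unfold Spec_string_to_move_list string_to_move_list string_to_move_list_alt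
  simpa using stmlLoopA_eq s.toList 0
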